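-- pv_equiv track=rewrite | github.com/axellbrendow/leetcode | python/basic-calculator-ii.py | calc_unary
-- ===== SOURCE A (Python) =====
-- def calc_digits(index, string):
--     if '0' <= string[index] <= '9':
--         num = ""
--         while index < len(string) and '0' <= string[index] <= '9':
--             num += string[index]
--             index += 1
--         return int(num), index
--     else:
--         return None, index
--
-- def calc_unary(index, string):
--     if string[index] == '-':
--         value, index = calc_unary(index + 1, string)
--         return -value, index
--
--     if string[index] == '+':
--         value, index = calc_unary(index + 1, string)
--         return value, index
--
--     return calc_digits(index, string)
-- ===== SOURCE B (Python) =====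
-- def calc_digits(index, string):
--     if '0' <= string[index] <= '9':
--         num = ""
--         while index < len(string) and '0' <= string[index] <= '9':
--             num += string[index]
--             index += 1
--         return int(num), index
--     else:
--         return None, index
--
-- def calc_unary(index, string):
--     negs = 0
--     while string[index] in '+-':
--         if string[index] == '-':
--             negs += 1
--         index += 1
--     value, index = calc_digits(index, string)
--     if value is not None and negs % 2:
--         value = -value
--     return value, index
-- ===== Notes on version B (the rewrite author's own statement) =====
-- stated objective: simpler
-- what changed: Replaces A's recursion that negates the value once per '-' sign by a single iterative loop that counts '-' signs and applies one negation by parity after parsing the digit run.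
-- outside the precondition, e.g. on calc_unary(0, 'abc'): A returns (None, 0), B returns (None, 0)
import Mathlib
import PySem

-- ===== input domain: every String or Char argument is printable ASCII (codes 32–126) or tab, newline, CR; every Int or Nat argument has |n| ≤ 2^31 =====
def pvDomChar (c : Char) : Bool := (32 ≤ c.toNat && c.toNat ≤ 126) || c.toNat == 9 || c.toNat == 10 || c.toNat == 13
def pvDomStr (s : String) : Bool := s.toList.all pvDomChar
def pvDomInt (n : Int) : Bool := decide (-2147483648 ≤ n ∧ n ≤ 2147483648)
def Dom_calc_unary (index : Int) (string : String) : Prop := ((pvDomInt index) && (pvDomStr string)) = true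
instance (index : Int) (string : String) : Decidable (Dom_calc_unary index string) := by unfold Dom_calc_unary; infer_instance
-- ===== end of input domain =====

-- B rewrites the recursive sign handling as an iterative '-'-counting loop with one parity
-- negation; equivalence is proved on inputs where the Python A returns an int (Pre_ below).

-- ===== PORT A =====
-- the while-loop of calc_digits: num += string[index]; index += 1
def cdLoop (cs : List Char) (index : Int) (num : List Char) : List Char × Int :=
  if _h : index < (cs.length : Int) then
    match PySem.List.pyGet? cs index with
    | some c =>
      if '0' ≤ c ∧ c ≤ '9' then cdLoop cs (index + 1) (num ++ [c]) else (num, index)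
    | none => (num, index)   -- unreachable under the loop guard for indices this loop reaches
  else (num, index)
termination_by ((cs.length : Int) - index).toNat
decreasing_by omega

-- calc_digits; Option Int models Python's None / int result (none also on IndexError)
def calc_digitsO (cs : List Char) (index : Int) : Option Int × Int :=
  match PySem.List.pyGet? cs index with
  | some c =>
    if '0' ≤ c ∧ c ≤ '9' then
      let r := cdLoop cs index []
      (PySem.Int.ofChars? r.1, r.2)
    else (none, index)
  | none => (none, index)    -- IndexError in Python (outside Pre_)

-- A's recursion; the `index < length` guard only makes the recursion total: for
-- index ≥ length pyGet? is none anyway (IndexError in Python, outside Pre_)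
def calc_unaryO (cs : List Char) (index : Int) : Option Int × Int :=
  if index < (cs.length : Int) then
    match PySem.List.pyGet? cs index with
    | some c =>
      if c = '-' then
        let r := calc_unaryO cs (index + 1)
        (r.1.map (fun x => -x), r.2)   -- -None = TypeError in Python (outside Pre_)
      else if c = '+' then
        let r := calc_unaryO cs (index + 1)
        (r.1, r.2)
      else calc_digitsO cs index
    | none => (none, index)
  else (none, index)
termination_by ((cs.length : Int) - index).toNat
decreasing_by omega

def calc_unary (index : Int) (string : String) : Int × Int :=
  let r := calc_unaryO string.toList index
  (r.1.getD 0, r.2)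

-- ===== PORT B =====
-- while string[index] in '+-': count '-' signs, advance (none = IndexError; the
-- `index < length` guard only makes the loop total, as in calc_unaryO above)
def altSkip (cs : List Char) (index : Int) (negs : Nat) : Option (Int × Nat) :=
  if index < (cs.length : Int) then
    match PySem.List.pyGet? cs index with
    | some c =>
      if c = '+' ∨ c = '-' then
        altSkip cs (index + 1) (negs + if c = '-' then 1 else 0)
      else some (index, negs)
    | none => none
  else none
termination_by ((cs.length : Int) - index).toNat
decreasing_by omega

def calc_unary_alt (index : Int) (string : String) : Int × Int :=
  match altSkip string.toList index 0 with
  | some (i, negs) =>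
    let r := calc_digitsO string.toList i   -- B keeps the calc_digits helper
    let v := if r.1.isSome ∧ negs % 2 = 1 then r.1.map (fun x => -x) else r.1
    (v.getD 0, r.2)
  | none => (0, 0)           -- IndexError in Python (outside Pre_)

-- ===== PRECONDITION & SPEC =====
def signAt (cs : List Char) (i : Int) : Bool :=
  match PySem.List.pyGet? cs i with
  | some c => c = '+' || c = '-'
  | none => false

def digitAt (cs : List Char) (i : Int) : Bool :=
  match PySem.List.pyGet? cs i with
  | some c => decide ('0' ≤ c) && decide (c ≤ '9')
  | none => false

-- Pre_ excludes exactly the inputs on which the Python A does not return a pair of ints: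
-- it raises IndexError (an index out of range along the sign prefix), raises TypeError
-- (a '-' sign with no digit after the signs), or returns None as the first component
-- (no digit and no '-' at the effective position), which is not an int.
def Pre_calc_unary (index : Int) (string : String) : Prop :=
  ∃ k : Nat, k < 2 * string.toList.length + 1 ∧
    (∀ j : Nat, j < k → signAt string.toList (index + j) = true) ∧
    digitAt string.toList (index + k) = true

instance (index : Int) (string : String) : Decidable (Pre_calc_unary index string) := by
  unfold Pre_calc_unary; infer_instance

def pvWitness_calc_unary : Int × String := (0, "-12")

def Spec_calc_unary (index : Int) (string : String) (out : Int × Int) : Prop :=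
  out = calc_unary_alt index string
instance (index : Int) (string : String) (out : Int × Int) : Decidable (Spec_calc_unary index string out) := by unfold Spec_calc_unary; infer_instance

-- ===== CLAIM (what is proved, stated in full; the proofs are below) =====
def Claim_equal_calc_unary : Prop := ∀ (index : Int) (string : String), Dom_calc_unary index string → Pre_calc_unary index string → Spec_calc_unary index string (calc_unary index string)

-- ===== LEMMAS AND PROOFS =====

-- pyGet? succeeds only below the length (used in the unfolding equations below)
theorem pvGet_lt {α : Type} {cs : List α} {i : Int} {c : α}
    (h : PySem.List.pyGet? cs i = some c) : i < (cs.length : Int) := by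
  by_contra hn
  rw [(PySem.List.pyGet?_eq_none_iff (xs := cs) (i := i)).mpr (by
    unfold PySem.Raise.InRange; omega)] at h
  simp at h


-- unfolding equations for the two recursions at a successful index
theorem calc_unaryO_some (cs : List Char) (index : Int) (c : Char)
    (h : PySem.List.pyGet? cs index = some c) :
    calc_unaryO cs index =
      if c = '-' then
        ((calc_unaryO cs (index + 1)).1.map (fun x => -x), (calc_unaryO cs (index + 1)).2)
      else if c = '+' then calc_unaryO cs (index + 1)
      else calc_digitsO cs index := by
  rw [calc_unaryO, if_pos (pvGet_lt h), h]

theorem altSkip_some (cs : List Char) (index : Int) (negs : Nat) (c : Char)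
    (h : PySem.List.pyGet? cs index = some c) :
    altSkip cs index negs =
      if c = '+' ∨ c = '-' then
        altSkip cs (index + 1) (negs + if c = '-' then 1 else 0)
      else some (index, negs) := by
  rw [altSkip, if_pos (pvGet_lt h), h]

-- Main invariant: if k sign characters start at `index` and a digit follows them, then
-- B's skip loop stops at index+k having counted some `negs` minus signs, and A's
-- recursion returns calc_digits at index+k with the value negated iff negs is odd.
theorem pv_main (cs : List Char) : ∀ (k : Nat) (index : Int) (m : Nat),
    (∀ j : Nat, j < k → signAt cs (index + j) = true) →
    digitAt cs (index + k) = true →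
    ∃ negs : Nat,
      altSkip cs index m = some (index + (k : Int), m + negs) ∧
      calc_unaryO cs index =
        ((calc_digitsO cs (index + k)).1.map (fun x => if negs % 2 = 1 then -x else x),
         (calc_digitsO cs (index + k)).2) := by
  intro k
  induction k with
  | zero =>
    intro index m _ hd
    simp only [Nat.cast_zero, add_zero] at hd ⊢
    unfold digitAt at hd
    cases h : PySem.List.pyGet? cs index with
    | none => rw [h] at hd; simp at hd
    | some c =>
      rw [h] at hd
      have hdig : '0' ≤ c ∧ c ≤ '9' := by simpa using hd
      have hm : c ≠ '-' := by rintro rfl; exact absurd hdig (by decide)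
      have hp : c ≠ '+' := by rintro rfl; exact absurd hdig (by decide)
      refine ⟨0, ?_, ?_⟩
      · rw [altSkip_some cs index m c h, if_neg (by rintro (rfl | rfl) <;> simp_all)]
        simp
      · rw [calc_unaryO_some cs index c h, if_neg hm, if_neg hp]
        simp
  | succ k ih =>
    intro index m hs hd
    have h0 : signAt cs index = true := by simpa using hs 0 (Nat.succ_pos k)
    unfold signAt at h0
    cases h : PySem.List.pyGet? cs index with
    | none => rw [h] at h0; simp at h0
    | some c =>
      rw [h] at h0
      have hpm : c = '+' ∨ c = '-' := by
        rcases Bool.or_eq_true_iff.mp h0 with h' | h'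
        · exact Or.inl (by simpa using h')
        · exact Or.inr (by simpa using h')
      have hs' : ∀ j : Nat, j < k → signAt cs (index + 1 + j) = true := by
        intro j hj
        have := hs (j + 1) (by omega)
        have e : index + ((j : Int) + 1) = index + 1 + j := by ring
        simpa [e] using this
      have hd' : digitAt cs (index + 1 + k) = true := by
        have e : index + ((k : Int) + 1) = index + 1 + k := by ring
        simpa [Nat.cast_succ, e] using hd
      have e1 : index + 1 + (k : Int) = index + ((k + 1 : Nat) : Int) := by push_cast; ring
      rcases hpm with rfl | rfl
      · -- '+': the minus count is unchanged
        obtain ⟨negs, hskip, hrec⟩ := ih (index + 1) m hs' hd'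
        refine ⟨negs, ?_, ?_⟩
        · rw [altSkip_some cs index m '+' h, if_pos (Or.inl rfl),
            if_neg (by decide), add_zero, hskip, e1]
        · rw [calc_unaryO_some cs index '+' h, if_neg (by decide), if_pos rfl, hrec, e1]
      · -- '-': one more minus sign, parity of the negation flips
        obtain ⟨negs, hskip, hrec⟩ := ih (index + 1) (m + 1) hs' hd'
        refine ⟨negs + 1, ?_, ?_⟩
        · have e2 : m + 1 + negs = m + (negs + 1) := by omega
          rw [altSkip_some cs index m '-' h, if_pos (Or.inr rfl), if_pos rfl, hskip, e1, e2]
        · have hf : ((fun x => -x) ∘ fun x : Int => if negs % 2 = 1 then -x else x) =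
              (fun x : Int => if (negs + 1) % 2 = 1 then -x else x) := by
            funext x
            by_cases hpar : negs % 2 = 1
            · have h2 : (negs + 1) % 2 = 0 := by omega
              simp [Function.comp, hpar, h2]
            · have h2 : (negs + 1) % 2 = 1 := by omega
              simp [Function.comp, hpar, h2]
          rw [calc_unaryO_some cs index '-' h, if_pos rfl, hrec, e1, Option.map_map, hf]

-- ===== VERDICT (by name: the statement is the Claim_ definition above) =====
theorem calc_unary_spec : Claim_equal_calc_unary := by
  intro index string _ hpre
  obtain ⟨k, _, hs, hd⟩ := hpre
  obtain ⟨negs, hskip, hrec⟩ := pv_main string.toList k index 0 hs hd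
  unfold Spec_calc_unary calc_unary calc_unary_alt
  rw [hrec, hskip]
  simp only [Nat.zero_add]
  cases hv : (calc_digitsO string.toList (index + (k : Int))).1 with
  | none => simp
  | some v =>
    by_cases hpar : negs % 2 = 1 <;> simp [hpar]
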